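-- pv_equiv track=rewrite | github.com/joojeehwan/algorithm_genius | Programmers/92342_양궁대회/4.py | solution
-- ===== SOURCE A (Python) =====
-- def solution(n, info):
--     answer = [0] * 11
--     arrows = [0] * 11
--     maxDif = 0
--
--     for subset in range(1, 1 << 10):
--         R = 0
--         A = 0
--         cnt = 0
--
--         for i in range(10):
--             if subset & (1 << i):
--                 R += 10 - i
--                 arrows[i] = info[i] + 1
--                 cnt += arrows[i]
--             else:
--                 arrows[i] = 0
--                 if info[i]:
--                     A += 10 - i
--
--         if cnt > n:
--             continue
--
--         arrows[10] = n - cnt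
--
--         if R - A == maxDif:
--             for j in reversed(range(11)):
--                 if arrows[j] > answer[j]:
--                     maxDif = R - A
--                     answer = arrows[:]
--                     break
--                 elif arrows[j] < answer[j]:
--                     break
--
--         elif R - A > maxDif:
--             maxDif = R - A
--             answer = arrows[:]
--
--     if maxDif == 0:
--         answer = [-1]
--     return answer
-- ===== SOURCE B (Python) =====
-- def solution(n, info):
--     # Recursive DFS over rings 9..0: lose (0 arrows) or win (info[i]+1 arrows);
--     # at the leaf keep the candidate iff its gap is positive and its key
--     # (gap, arrows[10], arrows[9], ..., arrows[0]) strictly beats the best so far.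
--     best = None  # (gap, arrows)
--
--     def better(gap, cand):
--         if best is None:
--             return True
--         bg, barr = best
--         if gap != bg:
--             return gap > bg
--         for j in range(10, -1, -1):
--             if cand[j] != barr[j]:
--                 return cand[j] > barr[j]
--         return False
--
--     def dfs(i, rem, suffix, gap):
--         nonlocal best
--         if i < 0:
--             if rem >= 0 and gap > 0:
--                 cand = suffix + [rem]
--                 if better(gap, cand):
--                     best = (gap, cand)
--             return
--         hit = info[i] + 1
--         dfs(i - 1, rem, [0] + suffix, gap - ((10 - i) if info[i] else 0))
--         dfs(i - 1, rem - hit, [hit] + suffix, gap + (10 - i))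
--
--     dfs(9, n, [], 0)
--     return best[1] if best is not None else [-1]
-- ===== Notes on version B (the rewrite author's own statement) =====
-- stated objective: alternative
-- what changed: A's flat bitmask loop over subsets 1..1023 with a mutated shared arrows array and a maxDif state machine is replaced by a recursive DFS over rings 9..0 that builds each candidate functionally, tracks the gap incrementally, and keeps the best positive-gap candidate under the key (gap, arrows[10..0]).
import Mathlib
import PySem

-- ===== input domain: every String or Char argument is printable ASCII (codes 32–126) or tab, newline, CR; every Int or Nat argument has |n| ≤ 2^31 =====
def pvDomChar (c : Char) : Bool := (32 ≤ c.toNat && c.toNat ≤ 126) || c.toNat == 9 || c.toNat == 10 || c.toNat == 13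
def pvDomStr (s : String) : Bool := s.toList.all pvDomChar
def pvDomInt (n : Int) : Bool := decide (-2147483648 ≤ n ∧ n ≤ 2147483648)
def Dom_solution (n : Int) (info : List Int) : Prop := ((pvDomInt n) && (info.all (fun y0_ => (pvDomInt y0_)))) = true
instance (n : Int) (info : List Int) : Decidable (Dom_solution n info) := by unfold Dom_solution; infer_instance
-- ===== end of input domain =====

-- B replaces A's bitmask enumeration of the 1024 win/lose choices by a recursive DFS over
-- the rings with an incremental gap/arrow count and a filter for positive gaps (objective:
-- alternative decomposition, same cost).

-- ===== PORT A =====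
-- A's inner `for i in range(10)` loop body; the Python list `arrows` (mutated in place)
-- is threaded through the fold state.  `i.toNat` is exact: i comes from range(10), so i ≥ 0.
def innerStepA (info : List Int) (subset : Int)
    (st : Int × Int × Int × List Int) (i : Int) : Int × Int × Int × List Int :=
  if PySem.Int.band subset ((1:Int) <<< i.toNat) ≠ 0 then
    (st.1 + (10 - i), st.2.1, st.2.2.1 + (PySem.List.pyGetD info i 0 + 1),
      PySem.List.pySetD st.2.2.2 i (PySem.List.pyGetD info i 0 + 1))
  else
    if PySem.List.pyGetD info i 0 ≠ 0 then
      (st.1, st.2.1 + (10 - i), st.2.2.1, PySem.List.pySetD st.2.2.2 i 0)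
    else
      (st.1, st.2.1, st.2.2.1, PySem.List.pySetD st.2.2.2 i 0)

-- A's `for j in reversed(range(11))` comparison loop: True = the update/break branch fires.
def tieA (arrows answer : List Int) : List Int → Bool
  | [] => false
  | j :: js =>
    if PySem.List.pyGetD arrows j 0 > PySem.List.pyGetD answer j 0 then true
    else if PySem.List.pyGetD arrows j 0 < PySem.List.pyGetD answer j 0 then false
    else tieA arrows answer js

-- one iteration of `for subset in range(1, 1 << 10)`, state (answer, arrows, maxDif)
def outerStepA (n : Int) (info : List Int)
    (st : List Int × List Int × Int) (subset : Int) : List Int × List Int × Int :=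
  let r := (PySem.List.pyRange 0 10 1).foldl (innerStepA info subset) (0, 0, 0, st.2.1)
  if r.2.2.1 > n then (st.1, r.2.2.2, st.2.2)
  else
    let arrows := PySem.List.pySetD r.2.2.2 10 (n - r.2.2.1)
    if r.1 - r.2.1 = st.2.2 then
      if tieA arrows st.1 (PySem.List.pyRange 10 (-1) (-1)) then (arrows, arrows, r.1 - r.2.1)
      else (st.1, arrows, st.2.2)
    else if r.1 - r.2.1 > st.2.2 then (arrows, arrows, r.1 - r.2.1)
    else (st.1, arrows, st.2.2)

def solution (n : Int) (info : List Int) : List Int :=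
  let st := (PySem.List.pyRange 1 ((1:Int) <<< 10) 1).foldl (outerStepA n info)
      (List.replicate 11 (0:Int), List.replicate 11 (0:Int), 0)
  if st.2.2 = 0 then [-1] else st.1

-- ===== PORT B =====
-- B's `better` index loop `for j in range(10, -1, -1)`
def cmpB (cand barr : List Int) : List Int → Bool
  | [] => false
  | j :: js =>
    if PySem.List.pyGetD cand j 0 ≠ PySem.List.pyGetD barr j 0 then
      PySem.List.pyGetD cand j 0 > PySem.List.pyGetD barr j 0
    else cmpB cand barr js

def betterB (best : Option (Int × List Int)) (gap : Int) (cand : List Int) : Bool :=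
  match best with
  | none => true
  | some (bg, barr) =>
    if gap ≠ bg then gap > bg else cmpB cand barr (PySem.List.pyRange 10 (-1) (-1))

-- B's base case (`if i < 0:` body)
def leafB (best : Option (Int × List Int)) (rem : Int) (suffix : List Int) (gap : Int) :
    Option (Int × List Int) :=
  if rem ≥ 0 ∧ gap > 0 then
    if betterB best gap (suffix ++ [rem]) then some (gap, suffix ++ [rem]) else best
  else best

-- B's `dfs(i, rem, suffix, gap)`; fuel = i + 1 (fuel 0 is Python's i < 0 base case)
def dfsB (info : List Int) :
    Nat → Int → List Int → Int → Option (Int × List Int) → Option (Int × List Int)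
  | 0, rem, suffix, gap, best => leafB best rem suffix gap
  | k + 1, rem, suffix, gap, best =>
    let hit := PySem.List.pyGetD info (k : Int) 0 + 1
    let best := dfsB info k rem (0 :: suffix)
      (gap - (if PySem.List.pyGetD info (k : Int) 0 ≠ 0 then 10 - (k : Int) else 0)) best
    dfsB info k (rem - hit) (hit :: suffix) (gap + (10 - (k : Int))) best

def solution_alt (n : Int) (info : List Int) : List Int :=
  match dfsB info 10 n [] 0 none with
  | some (_, arr) => arr
  | none => [-1]

-- ===== PRECONDITION & SPEC =====
-- A indexes info[0..9]; on shorter lists it raises IndexError (and so does B).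
def Pre_solution (_n : Int) (info : List Int) : Prop := 10 ≤ info.length
instance (n : Int) (info : List Int) : Decidable (Pre_solution n info) := by
  unfold Pre_solution; infer_instance
def pvWitness_solution : Int × List Int := (5, [2, 1, 1, 1, 0, 0, 0, 0, 0, 0])

def Spec_solution (n : Int) (info : List Int) (out : List Int) : Prop := out = solution_alt n info
instance (n : Int) (info : List Int) (out : List Int) : Decidable (Spec_solution n info out) := by
  unfold Spec_solution; infer_instance

-- ===== CLAIM (what is proved, stated in full; the proofs are below) =====
def Claim_equal_solution : Prop := ∀ (n : Int) (info : List Int),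
  Dom_solution n info → Pre_solution n info → Spec_solution n info (solution n info)

-- ===== LEMMAS AND PROOFS =====

-- Per-subset closed forms of A's inner loop (s = the bitmask; bit i ↔ ring i won):
-- R, opponent score A, arrow count, the arrows written for rings 0..9, and the gap.
def valF (info : List Int) (s i : Nat) : Int := if s.testBit i then info.getD i 0 + 1 else 0

def RF (s : Nat) (k : Nat) : Int :=
  ((List.range k).map (fun i => if s.testBit i then (10 - (i:Int)) else 0)).sum

def AF (info : List Int) (s : Nat) (k : Nat) : Int :=
  ((List.range k).map (fun i =>
    if s.testBit i then 0 else if info.getD i 0 ≠ 0 then (10 - (i:Int)) else 0)).sum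

def cntF (info : List Int) (s : Nat) (k : Nat) : Int := ((List.range k).map (valF info s)).sum

def arrF (info : List Int) (s : Nat) (k : Nat) : List Int := (List.range k).map (valF info s)

def gapF (info : List Int) (s : Nat) (k : Nat) : Int := RF s k - AF info s k

def leavesB (info : List Int) : Nat → Int → List Int → Int → List (Int × List Int × Int)
  | 0, rem, suffix, gap => [(rem, suffix, gap)]
  | k + 1, rem, suffix, gap =>
    let hit := PySem.List.pyGetD info (k : Int) 0 + 1
    leavesB info k rem (0 :: suffix)
      (gap - (if PySem.List.pyGetD info (k : Int) 0 ≠ 0 then 10 - (k : Int) else 0)) ++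
    leavesB info k (rem - hit) (hit :: suffix) (gap + (10 - (k : Int)))

def leafOf (n : Int) (info : List Int) (s : Nat) : Int × List Int × Int :=
  (n - cntF info s 10, arrF info s 10, gapF info s 10)

def leafStep (st : Option (Int × List Int)) (l : Int × List Int × Int) :
    Option (Int × List Int) :=
  leafB st l.1 l.2.1 l.2.2


-- B-side: the leaves of B's DFS, in visit order, and the step applied at each leaf.
theorem cntF_succ (info : List Int) (t k : Nat) :
    cntF info t (k+1) = cntF info t k + valF info t k := by simp [cntF, List.range_succ]

theorem arrF_succ (info : List Int) (t k : Nat) :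
    arrF info t (k+1) = arrF info t k ++ [valF info t k] := by simp [arrF, List.range_succ]

theorem RF_succ (t k : Nat) :
    RF t (k+1) = RF t k + (if t.testBit k then (10:Int) - k else 0) := by
  simp [RF, List.range_succ]

theorem AF_succ (info : List Int) (t k : Nat) :
    AF info t (k+1) = AF info t k +
      (if t.testBit k then 0 else if info.getD k 0 ≠ 0 then (10:Int) - k else 0) := by
  simp [AF, List.range_succ]

theorem cntF_congr (info : List Int) (s t k : Nat) (h : ∀ i < k, s.testBit i = t.testBit i) :
    cntF info s k = cntF info t k := by
  unfold cntF
  exact congrArg List.sum (List.map_congr_left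
    (fun i hi => by simp [valF, h i (List.mem_range.mp hi)]))

theorem arrF_congr (info : List Int) (s t k : Nat) (h : ∀ i < k, s.testBit i = t.testBit i) :
    arrF info s k = arrF info t k :=
  List.map_congr_left (fun i hi => by simp [valF, h i (List.mem_range.mp hi)])

theorem RF_congr (s t k : Nat) (h : ∀ i < k, s.testBit i = t.testBit i) :
    RF s k = RF t k := by
  unfold RF
  exact congrArg List.sum (List.map_congr_left
    (fun i hi => by simp [h i (List.mem_range.mp hi)]))

theorem AF_congr (info : List Int) (s t k : Nat) (h : ∀ i < k, s.testBit i = t.testBit i) :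
    AF info s k = AF info t k := by
  unfold AF
  exact congrArg List.sum (List.map_congr_left
    (fun i hi => by simp [h i (List.mem_range.mp hi)]))

theorem leavesB_eq_map (info : List Int) (k : Nat) :
    ∀ (rem : Int) (suffix : List Int) (gap : Int),
    leavesB info k rem suffix gap = (List.range (2 ^ k)).map
      (fun s => (rem - cntF info s k, arrF info s k ++ suffix, gap + gapF info s k)) := by
  induction k with
  | zero =>
    intro rem suffix gap
    simp [leavesB, cntF, arrF, gapF, RF, AF]
  | succ k ih =>
    intro rem suffix gap
    simp only [leavesB, ih]
    rw [show 2 ^ (k+1) = 2 ^ k + 2 ^ k from by ring, List.range_add, List.map_append,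
      List.map_map]
    congr 1
    · apply List.map_congr_left
      intro s hs
      have hb : s.testBit k = false := Nat.testBit_lt_two_pow (List.mem_range.mp hs)
      refine Prod.ext ?_ (Prod.ext ?_ ?_)
      · simp [cntF_succ, valF, hb]
      · simp [arrF_succ, valF, hb]
      · show gap - _ + gapF info s k = gap + gapF info s (k+1)
        rw [gapF, gapF, RF_succ, AF_succ, PySem.List.pyGetD_natCast]
        simp only [hb, if_false, Bool.false_eq_true]
        split_ifs <;> ring
    · apply List.map_congr_left
      intro s hs
      have hs' : s < 2 ^ k := List.mem_range.mp hs
      have hb : (2 ^ k + s).testBit k = true := by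
        simp [Nat.testBit_two_pow_add_eq, Nat.testBit_lt_two_pow hs']
      have hlow : ∀ i < k, (2 ^ k + s).testBit i = s.testBit i :=
        fun i hi => Nat.testBit_two_pow_add_gt hi s
      refine Prod.ext ?_ (Prod.ext ?_ ?_)
      · show rem - _ - cntF info s k = rem - cntF info (2^k+s) (k+1)
        rw [cntF_succ, cntF_congr info (2^k+s) s k hlow, PySem.List.pyGetD_natCast]
        simp only [valF, hb, if_true]
        ring
      · show arrF info s k ++ _ :: suffix = arrF info (2^k+s) (k+1) ++ suffix
        rw [arrF_succ, arrF_congr info (2^k+s) s k hlow, PySem.List.pyGetD_natCast]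
        simp only [valF, hb, if_true]
        simp
      · show gap + _ + gapF info s k = gap + gapF info (2^k+s) (k+1)
        rw [gapF, gapF, RF_succ, AF_succ, RF_congr (2^k+s) s k hlow,
          AF_congr info (2^k+s) s k hlow]
        simp only [hb, if_true]
        ring

theorem band_testBit (s i : Nat) :
    (PySem.Int.band (s : Int) ((1:Int) <<< i) ≠ 0) ↔ s.testBit i := by
  rw [Int.shiftLeft_eq]
  rw [show ((1:Int) * 2 ^ i) = ((2 ^ i : Nat) : Int) by push_cast; ring]
  rw [PySem.Int.band_natCast, Nat.and_two_pow]
  cases h : s.testBit i <;> simp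

theorem set_mid (l1 : List Int) (x v : Int) (l2 : List Int) (n : Nat) (hn : n = l1.length) :
    (l1 ++ x :: l2).set n v = l1 ++ v :: l2 := by
  subst hn
  rw [List.set_append_right _ _ (le_refl _)]
  simp

theorem inner_spec (info : List Int) (s : Nat) (arrows0 : List Int)
    (h : arrows0.length = 11) (m : Nat) (hm : m ≤ 10) :
    (PySem.List.pyRange 0 (m : Nat) 1).foldl (innerStepA info (s : Int)) (0, 0, 0, arrows0)
      = (RF s m, AF info s m, cntF info s m, arrF info s m ++ arrows0.drop m) := by
  induction m with
  | zero =>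
    simp [PySem.List.pyRange_one_eq_nil, RF, AF, cntF, arrF]
  | succ m ih =>
    have hm' : m ≤ 10 := by omega
    have hrange : PySem.List.pyRange 0 ((m:Nat)+1 : Nat) 1
        = PySem.List.pyRange 0 (m : Nat) 1 ++ [(m : Int)] := by
      rw [show (((m:Nat)+1 : Nat) : Int) = (m : Int) + 1 by push_cast; ring]
      exact PySem.List.pyRange_one_succ_right (by positivity)
    rw [hrange, List.foldl_append, ih hm']
    have hdrop : arrows0.drop m = arrows0[m] :: arrows0.drop (m+1) :=
      List.drop_eq_getElem_cons (by omega)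
    have hlen : (arrF info s m).length = m := by simp [arrF]
    simp only [List.foldl_cons, List.foldl_nil, innerStepA, Int.toNat_natCast,
      PySem.List.pyGetD_natCast, PySem.List.pySetD_natCast]
    rw [hdrop]
    by_cases hb : s.testBit m
    · rw [if_pos (by rw [band_testBit]; exact hb)]
      rw [set_mid _ _ _ _ m hlen.symm]
      rw [RF_succ, AF_succ, cntF_succ, arrF_succ]
      simp [valF, hb]
    · rw [if_neg (fun hc => hb ((band_testBit s m).mp hc))]
      rw [set_mid _ _ _ _ m hlen.symm]
      rw [RF_succ, AF_succ, cntF_succ, arrF_succ]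
      by_cases hi : info.getD m 0 ≠ 0
      · rw [if_pos hi]; rw [List.getD_eq_getElem?_getD] at hi; simp [valF, hb, hi]
      · rw [if_neg hi]; rw [List.getD_eq_getElem?_getD] at hi; simp [valF, hb, hi]

theorem tieA_eq_cmpB (cand barr : List Int) (js : List Int) :
    tieA cand barr js = cmpB cand barr js := by
  induction js with
  | nil => rfl
  | cons j js ih =>
    simp only [tieA, cmpB]
    rcases lt_trichotomy (PySem.List.pyGetD cand j 0) (PySem.List.pyGetD barr j 0) with h | h | h
    · simp [h, ne_of_lt h]
    · simp [h, ih]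
    · simp [h, (ne_of_lt h).symm]

def PairInv (stA : List Int × List Int × Int) (stB : Option (Int × List Int)) : Prop :=
  stA.2.1.length = 11 ∧
    ((stA.2.2 = 0 ∧ stB = none) ∨ (0 < stA.2.2 ∧ stB = some (stA.2.2, stA.1)))

theorem step_pair (n : Int) (info : List Int) (s : Nat) (stA : List Int × List Int × Int)
    (stB : Option (Int × List Int)) (hInv : PairInv stA stB) :
    PairInv (outerStepA n info stA (s : Int)) (leafStep stB (leafOf n info s)) := by
  obtain ⟨hlen, hdisj⟩ := hInv
  have hin := inner_spec info s stA.2.1 hlen 10 (le_refl _)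
  rw [show ((10:Nat):Int) = (10:Int) from by norm_num] at hin
  have hd : stA.2.1.drop 10 = [stA.2.1[10]'(by omega)] := by
    rw [List.drop_eq_getElem_cons (by omega)]
    congr 1
    exact List.drop_eq_nil_of_le (by omega)
  rw [hd] at hin
  have hlen10 : (arrF info s 10).length = 10 := by simp [arrF]
  simp only [outerStepA, leafStep, leafOf, leafB]
  rw [hin]
  dsimp only
  have hset : ∀ x : Int, PySem.List.pySetD (arrF info s 10 ++ [x]) 10 (n - cntF info s 10)
      = arrF info s 10 ++ [n - cntF info s 10] := by
    intro x
    rw [show (10:Int) = ((10:Nat):Int) from by norm_num, PySem.List.pySetD_natCast]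
    exact set_mid _ _ _ _ 10 hlen10.symm
  rw [hset]
  have hclen : (arrF info s 10 ++ [n - cntF info s 10]).length = 11 := by simp [hlen10]
  have hg0 : RF s 10 - AF info s 10 = gapF info s 10 := rfl
  rw [hg0]
  by_cases hcnt : cntF info s 10 > n
  · rw [if_pos hcnt, if_neg (by omega : ¬ (n - cntF info s 10 ≥ 0 ∧ gapF info s 10 > 0))]
    exact ⟨by simp [hlen10], hdisj⟩
  · rw [if_neg hcnt]
    rcases hdisj with ⟨hmd, hB⟩ | ⟨hmd, hB⟩
    · subst hB
      rcases lt_trichotomy (gapF info s 10) 0 with hg | hg | hg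
      · rw [if_neg (by omega : ¬ gapF info s 10 = stA.2.2),
          if_neg (by omega : ¬ gapF info s 10 > stA.2.2),
          if_neg (by omega : ¬ (n - cntF info s 10 ≥ 0 ∧ gapF info s 10 > 0))]
        exact ⟨hclen, Or.inl ⟨hmd, rfl⟩⟩
      · rw [if_pos (by omega : gapF info s 10 = stA.2.2),
          if_neg (by omega : ¬ (n - cntF info s 10 ≥ 0 ∧ gapF info s 10 > 0))]
        split
        · exact ⟨hclen, Or.inl ⟨by omega, rfl⟩⟩
        · exact ⟨hclen, Or.inl ⟨hmd, rfl⟩⟩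
      · rw [if_neg (by omega : ¬ gapF info s 10 = stA.2.2),
          if_pos (by omega : gapF info s 10 > stA.2.2),
          if_pos (⟨by omega, hg⟩ : n - cntF info s 10 ≥ 0 ∧ gapF info s 10 > 0),
          if_pos (show betterB none (gapF info s 10) (arrF info s 10 ++ [n - cntF info s 10]) = true from rfl)]
        exact ⟨hclen, Or.inr ⟨hg, rfl⟩⟩
    · subst hB
      rcases lt_trichotomy (gapF info s 10) stA.2.2 with hg | hg | hg
      · rw [if_neg (by omega : ¬ gapF info s 10 = stA.2.2),
          if_neg (by omega : ¬ gapF info s 10 > stA.2.2)]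
        refine ⟨hclen, Or.inr ⟨hmd, ?_⟩⟩
        split_ifs with h1 h2
        · exfalso
          rw [betterB, if_pos (by omega : gapF info s 10 ≠ stA.2.2)] at h2
          simp at h2
          omega
        · rfl
        · rfl
      · rw [if_pos (by omega : gapF info s 10 = stA.2.2),
          if_pos (⟨by omega, by omega⟩ : n - cntF info s 10 ≥ 0 ∧ gapF info s 10 > 0),
          betterB, if_neg (by omega : ¬ gapF info s 10 ≠ stA.2.2), ← tieA_eq_cmpB]
        split
        · exact ⟨hclen, Or.inr ⟨by dsimp only; omega, by rw [hg]⟩⟩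
        · exact ⟨hclen, Or.inr ⟨hmd, rfl⟩⟩
      · rw [if_neg (by omega : ¬ gapF info s 10 = stA.2.2),
          if_pos (by omega : gapF info s 10 > stA.2.2),
          if_pos (⟨by omega, by omega⟩ : n - cntF info s 10 ≥ 0 ∧ gapF info s 10 > 0),
          betterB, if_pos (by omega : gapF info s 10 ≠ stA.2.2), if_pos (by simpa using hg)]
        exact ⟨hclen, Or.inr ⟨by dsimp only; omega, rfl⟩⟩


theorem fold_pair (n : Int) (info : List Int) (l : List Nat)
    (stA : List Int × List Int × Int) (stB : Option (Int × List Int)) (hInv : PairInv stA stB) :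
    PairInv (l.foldl (fun st (k : Nat) => outerStepA n info st (1 + (k : Int))) stA)
        (l.foldl (fun st k => leafStep st (leafOf n info (1 + k))) stB) := by
  induction l generalizing stA stB with
  | nil => exact hInv
  | cons a l ih =>
    simp only [List.foldl_cons]
    apply ih
    have := step_pair n info (1 + a) stA stB hInv
    simpa using this

theorem dfsB_eq_foldl (info : List Int) (k : Nat) :
    ∀ (rem : Int) (suffix : List Int) (gap : Int) (best : Option (Int × List Int)),
    dfsB info k rem suffix gap best = (leavesB info k rem suffix gap).foldl leafStep best := by
  induction k with
  | zero => intro rem suffix gap best; simp [dfsB, leavesB, leafStep]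
  | succ k ih => intro rem suffix gap best; simp [dfsB, leavesB, List.foldl_append, ih]

theorem leaf_zero_noop (n : Int) (info : List Int) :
    leafStep none (leafOf n info 0) = none := by
  have hR : RF 0 10 = 0 := by simp [RF]
  have hA : 0 ≤ AF info 0 10 := by
    apply List.sum_nonneg
    intro x hx
    simp only [List.mem_map, List.mem_range] at hx
    obtain ⟨i, hi, rfl⟩ := hx
    split_ifs <;> omega
  have hg : gapF info 0 10 ≤ 0 := by rw [gapF, hR]; omega
  simp only [leafStep, leafOf, leafB]
  rw [if_neg]
  simp only [not_and, not_lt]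
  intro _; omega

set_option maxRecDepth 8192 in
theorem range_1024_split :
    List.range 1024 = List.range 1 ++ (List.range 1023).map (fun k => 1 + k) := by
  have := List.range_add (n := 1) (m := 1023)
  norm_num at this
  exact this

-- ===== VERDICT (by name: the statement is the Claim_ definition above) =====
theorem solution_spec : Claim_equal_solution := by
  intro n info _ _
  unfold Spec_solution
  have hBfold : dfsB info 10 n [] 0 none
      = (List.range 1023).foldl (fun st k => leafStep st (leafOf n info (1 + k))) none := by
    rw [dfsB_eq_foldl, leavesB_eq_map]
    rw [show (2:Nat) ^ 10 = 1024 from by norm_num]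
    rw [show (List.range 1024).map
          (fun s => (n - cntF info s 10, arrF info s 10 ++ [], (0:Int) + gapF info s 10))
        = (List.range 1024).map (leafOf n info) from
      List.map_congr_left (fun s _ => by simp [leafOf])]
    rw [List.foldl_map, range_1024_split, List.foldl_append]
    simp only [List.range_one, List.foldl_cons, List.foldl_nil, leaf_zero_noop]
    rw [List.foldl_map]
  have hr : PySem.List.pyRange 1 ((1:Int) <<< 10) 1
      = (List.range 1023).map (fun k : Nat => (1:Int) + k) := by
    rw [show ((1:Int) <<< 10) = 1024 from by decide]
    rw [PySem.List.pyRange_one]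
    rfl
  have hpair := fold_pair n info (List.range 1023)
    (List.replicate 11 (0:Int), List.replicate 11 (0:Int), 0) none
    ⟨by simp, Or.inl ⟨rfl, rfl⟩⟩
  simp only [solution, solution_alt]
  rw [hr, List.foldl_map, hBfold]
  obtain ⟨-, hdisj⟩ := hpair
  rcases hdisj with ⟨hmd, hB⟩ | ⟨hmd, hB⟩
  · rw [hB, if_pos hmd]
  · rw [hB, if_neg (by omega)]
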